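-- pv_equiv track=rewrite | github.com/FaceDeer/dfcaverns | i18n.py | strings_to_text
-- ===== SOURCE A (Python) =====
-- def strings_to_text(dkeyStrings, dOld, mod_name):
--     lOut = ["# textdomain: %s\n" % mod_name]
--
--     dGroupedBySource = {}
--
--     for key in dkeyStrings:
--         sourceList = list(dkeyStrings[key])
--         sourceList.sort()
--         sourceString = "\n".join(sourceList)
--         listForSource = dGroupedBySource.get(sourceString, [])
--         listForSource.append(key)
--         dGroupedBySource[sourceString] = listForSource
--
--     lSourceKeys = list(dGroupedBySource.keys())
--     lSourceKeys.sort()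
--     for source in lSourceKeys:
--         lOut.append("")
--         localizedStrings = dGroupedBySource[source]
--         localizedStrings.sort()
--         lOut.append(source)
--         for localizedString in localizedStrings:
--             val = dOld.get(localizedString, "")
--             lOut.append("%s=%s" % (localizedString, val))
--
--     unusedExist = False
--     for key in dOld:
--         if key not in dkeyStrings:
--             if not unusedExist:
--                 unusedExist = True
--                 lOut.append("\n##### not used anymore #####")
--             lOut.append("%s=%s" % (key, dOld[key]))
--     return "\n".join(lOut)
-- ===== SOURCE B (Python) =====
-- # Same output as A, but with no grouping dict: the distinct source blocks are
-- # sorted(set(...)) and each block's keys are gathered by a filter; the unused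
-- # section is a comprehension guarded by emptiness instead of a first-time flag.
-- def strings_to_text(dkeyStrings, dOld, mod_name):
--     def source_of(key):
--         return "\n".join(sorted(dkeyStrings[key]))
--
--     lOut = ["# textdomain: %s\n" % mod_name]
--     for source in sorted({source_of(k) for k in dkeyStrings}):
--         lOut += ["", source]
--         lOut += ["%s=%s" % (k, dOld.get(k, ""))
--                  for k in sorted(k for k in dkeyStrings if source_of(k) == source)]
--     unused = ["%s=%s" % (k, v) for k, v in dOld.items() if k not in dkeyStrings]
--     if unused:
--         lOut.append("\n##### not used anymore #####")
--         lOut += unused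
--     return "\n".join(lOut)
-- ===== Notes on version B (the rewrite author's own statement) =====
-- stated objective: simpler
-- what changed: Replaced A's one-pass grouping dict (built key-by-key, then iterated with a per-bucket sort) by sorting the distinct source strings with sorted(set(...)) and collecting each block's keys with a filter, and replaced the first-time-flag loop for the unused section by a comprehension guarded by emptiness.
import Mathlib
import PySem

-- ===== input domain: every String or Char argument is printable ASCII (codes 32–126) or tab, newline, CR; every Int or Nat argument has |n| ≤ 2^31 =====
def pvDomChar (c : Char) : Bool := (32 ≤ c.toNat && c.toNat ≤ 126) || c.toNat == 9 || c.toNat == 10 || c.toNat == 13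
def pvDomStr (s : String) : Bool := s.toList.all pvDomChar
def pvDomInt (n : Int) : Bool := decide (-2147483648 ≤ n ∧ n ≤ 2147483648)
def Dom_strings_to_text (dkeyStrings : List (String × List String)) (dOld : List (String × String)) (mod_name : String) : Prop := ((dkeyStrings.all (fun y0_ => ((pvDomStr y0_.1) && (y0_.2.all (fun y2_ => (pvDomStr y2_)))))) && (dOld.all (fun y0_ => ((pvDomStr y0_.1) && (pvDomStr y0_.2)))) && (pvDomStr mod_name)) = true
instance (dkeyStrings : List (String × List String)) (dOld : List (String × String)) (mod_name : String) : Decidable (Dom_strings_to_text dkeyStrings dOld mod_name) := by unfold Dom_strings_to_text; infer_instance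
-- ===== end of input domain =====

-- B drops A's grouping dict (sorted distinct sources + a filter per source) and
-- replaces the first-time-flag loop for the unused section by a guarded list;
-- same output, objective: simpler decomposition.
-- The dict parameters are ported as assoc lists iterated pairwise; exact for
-- Python dicts (whose keys are distinct).

-- ===== PORT A =====
def strings_to_text (dkeyStrings : List (String × List String)) (dOld : List (String × String)) (mod_name : String) : String :=
  let lOut0 : List String := ["# textdomain: " ++ mod_name ++ "\n"]
  let dGroupedBySource : PySem.Dict String (List String) :=
    dkeyStrings.foldl (fun d kv =>
      let sourceList := PySem.List.sorted kv.2 (fun x => x) false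
      let sourceString := PySem.Str.join "\n" sourceList
      let listForSource := d.getD sourceString []
      d.insert sourceString (listForSource ++ [kv.1])) PySem.Dict.empty
  let lSourceKeys := PySem.List.sorted dGroupedBySource.keys (fun x => x) false
  let lOut1 := lSourceKeys.foldl (fun acc source =>
      let localizedStrings := PySem.List.sorted (dGroupedBySource.getD source []) (fun x => x) false
      localizedStrings.foldl (fun a ls => a ++ [ls ++ "=" ++ ((dOld.lookup ls).getD "")])
        (acc ++ ["", source])) lOut0
  let final := dOld.foldl (fun (st : List String × Bool) kv =>
      if kv.1 ∈ dkeyStrings.map Prod.fst then st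
      else
        let st1 := if st.2 then st else (st.1 ++ ["\n##### not used anymore #####"], true)
        (st1.1 ++ [kv.1 ++ "=" ++ kv.2], st1.2)) (lOut1, false)
  PySem.Str.join "\n" final.1

-- ===== PORT B =====
def pvSourceOf (ss : List String) : String :=
  PySem.Str.join "\n" (PySem.List.sorted ss (fun x => x) false)

def strings_to_text_alt (dkeyStrings : List (String × List String)) (dOld : List (String × String)) (mod_name : String) : String :=
  let lOut := (PySem.List.sorted (PySem.Set.ofList (dkeyStrings.map (fun kv => pvSourceOf kv.2))) (fun x => x) false).foldl
    (fun acc source =>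
      (acc ++ ["", source]) ++
        (PySem.List.sorted ((dkeyStrings.filter (fun kv => pvSourceOf kv.2 == source)).map Prod.fst) (fun x => x) false).map
          (fun k => k ++ "=" ++ ((dOld.lookup k).getD "")))
    ["# textdomain: " ++ mod_name ++ "\n"]
  let unused := (dOld.filter (fun kv => kv.1 ∉ dkeyStrings.map Prod.fst)).map (fun kv => kv.1 ++ "=" ++ kv.2)
  PySem.Str.join "\n" (if unused = [] then lOut else (lOut ++ ["\n##### not used anymore #####"]) ++ unused)

-- ===== PRECONDITION & SPEC =====
def Spec_strings_to_text (dkeyStrings : List (String × List String)) (dOld : List (String × String)) (mod_name : String) (out : String) : Prop := out = strings_to_text_alt dkeyStrings dOld mod_name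
instance (dkeyStrings : List (String × List String)) (dOld : List (String × String)) (mod_name : String) (out : String) : Decidable (Spec_strings_to_text dkeyStrings dOld mod_name out) := by unfold Spec_strings_to_text; infer_instance

-- ===== CLAIM (what is proved, stated in full; the proofs are below) =====
def Claim_equal_strings_to_text : Prop := ∀ (dkeyStrings : List (String × List String)) (dOld : List (String × String)) (mod_name : String), Dom_strings_to_text dkeyStrings dOld mod_name → Spec_strings_to_text dkeyStrings dOld mod_name (strings_to_text dkeyStrings dOld mod_name)

-- ===== LEMMAS AND PROOFS =====

-- The grouping dict's bucket for s is exactly the keys whose source string is s.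
lemma pv_bucket (f : String × List String → String) :
    ∀ (xs : List (String × List String)) (d : PySem.Dict String (List String)) (s : String),
      (xs.foldl (fun d kv => d.insert (f kv) (d.getD (f kv) [] ++ [kv.1])) d).getD s []
        = d.getD s [] ++ (xs.filter (fun kv => f kv == s)).map Prod.fst := by
  intro xs
  induction xs with
  | nil => intro d s; simp
  | cons x t ih =>
    intro d s
    simp only [List.foldl_cons, List.filter_cons]
    rw [ih]
    by_cases h : f x = s
    · simp [h]
    · simp [PySem.Dict.getD_insert, h, Ne.symm h]

lemma pv_getD_empty (s : String) :
    (PySem.Dict.empty : PySem.Dict String (List String)).getD s [] = [] := rfl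

lemma pv_keys_insert {ν : Type} (d : PySem.Dict String ν) (k : String) (v : ν) :
    (d.insert k v).keys = if d.contains k then d.keys else d.keys ++ [k] := by
  unfold PySem.Dict.insert PySem.Dict.keys
  by_cases hc : d.contains k = true
  · rw [if_pos hc, if_pos hc, List.map_map]
    apply List.map_congr_left
    intro p _
    by_cases h : (p.1 == k) = true
    · simpa [Function.comp, h] using (eq_of_beq h).symm
    · simp [Function.comp, h]
  · rw [if_neg hc, if_neg hc]
    simp

lemma pv_contains_iff {ν : Type} (d : PySem.Dict String ν) (k : String) :
    d.contains k = true ↔ k ∈ d.keys := by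
  simp only [PySem.Dict.contains, PySem.Dict.keys, List.any_eq_true, beq_iff_eq, List.mem_map]

-- The grouping dict's keys are the distinct source strings in first-occurrence order.
lemma pv_keys (f : String × List String → String) :
    ∀ (xs : List (String × List String)),
      (xs.foldl (fun d kv => d.insert (f kv) (d.getD (f kv) [] ++ [kv.1])) PySem.Dict.empty).keys
        = PySem.Set.ofList (xs.map f) := by
  intro xs
  induction xs using List.reverseRecOn with
  | nil => rfl
  | append_singleton t x ih =>
    rw [List.foldl_append, List.map_append, List.foldl_cons]
    unfold PySem.Set.ofList
    rw [List.foldl_append]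
    show _ = PySem.Set.add (PySem.Set.ofList (t.map f)) (f x)
    rw [List.foldl_nil, pv_keys_insert, ← ih]
    unfold PySem.Set.add
    by_cases h : (List.foldl (fun d kv => d.insert (f kv) (d.getD (f kv) [] ++ [kv.1])) PySem.Dict.empty t).contains (f x) = true
    · rw [if_pos h, if_pos]
      have := (pv_contains_iff _ (f x)).mp h
      simpa [List.contains_iff_mem] using this
    · rw [if_neg h, if_neg]
      intro hc
      exact h ((pv_contains_iff _ (f x)).mpr (by simpa [List.contains_iff_mem] using hc))

-- the flag-carrying unused loop, once the flag is already set
lemma pv_unused_true {α : Type} (P : α → Prop) [DecidablePred P] (H : String) (line : α → String) :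
    ∀ (ys : List α) (acc : List String),
      ys.foldl (fun (st : List String × Bool) kv =>
        if P kv then st
        else ((if st.2 = true then st else (st.1 ++ [H], true)).1 ++ [line kv],
              (if st.2 = true then st else (st.1 ++ [H], true)).2)) (acc, true)
        = (acc ++ (ys.filter (fun kv => decide ¬ P kv)).map line, true) := by
  intro ys
  induction ys with
  | nil => intro acc; simp
  | cons y t ih =>
    intro acc
    simp only [List.foldl_cons, List.filter_cons]
    by_cases h : P y
    · simp [h, ih]
    · simp [h, ih]

-- the flag-carrying unused loop equals the guarded comprehension
lemma pv_unused_false {α : Type} (P : α → Prop) [DecidablePred P] (H : String) (line : α → String)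
    (ys : List α) (acc : List String) :
      (ys.foldl (fun (st : List String × Bool) kv =>
        if P kv then st
        else ((if st.2 = true then st else (st.1 ++ [H], true)).1 ++ [line kv],
              (if st.2 = true then st else (st.1 ++ [H], true)).2)) (acc, false)).1
        = (if (ys.filter (fun kv => decide ¬ P kv)).map line = [] then acc
           else (acc ++ [H]) ++ (ys.filter (fun kv => decide ¬ P kv)).map line) := by
  induction ys generalizing acc with
  | nil => simp
  | cons y t ih =>
    simp only [List.foldl_cons, List.filter_cons]
    by_cases h : P y
    · simpa [h] using ih acc
    · rw [if_neg h]
      have hstep : ((if ((acc, false) : List String × Bool).2 = true then ((acc, false) : List String × Bool) else (acc ++ [H], true)).1 ++ [line y],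
          (if ((acc, false) : List String × Bool).2 = true then ((acc, false) : List String × Bool) else (acc ++ [H], true)).2)
          = ((acc ++ [H]) ++ [line y], true) := by simp
      rw [hstep, pv_unused_true P H line t]
      simp [h, List.append_assoc]

lemma pv_foldl_singleton_map {α : Type} (g : α → String) :
    ∀ (xs : List α) (init : List String),
      xs.foldl (fun a x => a ++ [g x]) init = init ++ xs.map g := by
  intro xs
  induction xs with
  | nil => intro init; simp
  | cons x t ih => intro init; simp [ih]

-- ===== VERDICT (by name: the statement is the Claim_ definition above) =====
theorem strings_to_text_spec : Claim_equal_strings_to_text := by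
  intro dkeyStrings dOld mod_name _h
  unfold Spec_strings_to_text strings_to_text strings_to_text_alt
  simp only [pvSourceOf]
  rw [pv_keys (fun kv => PySem.Str.join "\n" (PySem.List.sorted kv.2 (fun x => x) false))]
  simp only [pv_bucket (fun kv => PySem.Str.join "\n" (PySem.List.sorted kv.2 (fun x => x) false)) dkeyStrings,
             pv_getD_empty, List.nil_append, pv_foldl_singleton_map]
  rw [pv_unused_false (fun kv => kv.1 ∈ dkeyStrings.map Prod.fst) "\n##### not used anymore #####"
        (fun kv => kv.1 ++ "=" ++ kv.2) dOld]
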